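-- pv_equiv track=rewrite | github.com/Marco-Sulla/msutils | msutils/mathutil.py | divideAndRedistribute
-- ===== SOURCE A (Python) =====
-- def divideAndRedistribute(a, b, alternate=False):
--     _a = int(a)
--     _b = int(b)
--
--     if not (_a == a and _b == b):
--         raise ArithmeticError("Expected integer parameters")
--
--     num, rest = divmod(_a, _b)
--     res = [num] * _b
--
--     if alternate:
--         if rest:
--             r = range(0, _b, 2)
--
--             for i in r:
--                 res[i] += 1
--                 rest -= 1
--
--                 if rest == 0:
--                     break
--
--         if rest:
--             r = range(1, _b, 2)
--
--             for i in r: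
--                 res[i] += 1
--                 rest -= 1
--
--                 if rest == 0:
--                     break
--     else:
--         for i in range(rest):
--             res[i] += 1
--
--     return res
-- ===== SOURCE B (Python) =====
-- def divideAndRedistribute(a, b, alternate=False):
--     _a = int(a)
--     _b = int(b)
--
--     if not (_a == a and _b == b):
--         raise ArithmeticError("Expected integer parameters")
--
--     num, rest = divmod(_a, _b)
--
--     if alternate:
--         # evens (0,2,4,...) are served first; an even index i is the (i//2)-th
--         # to receive an extra unit, an odd index i the (ceil(b/2) + i//2)-th.
--         half = (_b + 1) // 2
--         return [num + (1 if (i // 2 if i % 2 == 0 else half + i // 2) < rest else 0)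
--                 for i in range(_b)]
--
--     return [num + (1 if i < rest else 0) for i in range(_b)]
-- ===== Notes on version B (the rewrite author's own statement) =====
-- stated objective: alternative
-- what changed: Replaces A's in-place incremental distribution (build [num]*b, then mutate it with decrementing break-loops over even/odd ranges) by a mutation-free closed-form comprehension that computes each entry directly from its index's rank in the serving order (evens ranked i//2, odds ranked ceil(b/2)+i//2).
import Mathlib
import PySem

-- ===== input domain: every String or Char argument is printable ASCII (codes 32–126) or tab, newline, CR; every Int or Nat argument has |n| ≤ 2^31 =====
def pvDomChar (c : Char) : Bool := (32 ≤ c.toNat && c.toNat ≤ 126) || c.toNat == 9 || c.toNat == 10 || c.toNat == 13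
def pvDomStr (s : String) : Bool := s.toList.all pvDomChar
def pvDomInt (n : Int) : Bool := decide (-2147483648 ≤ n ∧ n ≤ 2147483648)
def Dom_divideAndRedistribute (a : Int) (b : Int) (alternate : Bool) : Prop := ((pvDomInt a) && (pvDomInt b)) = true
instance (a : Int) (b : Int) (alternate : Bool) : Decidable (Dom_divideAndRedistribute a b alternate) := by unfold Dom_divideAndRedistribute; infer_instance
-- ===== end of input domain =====

-- B computes each entry by a closed-form rank formula instead of A's in-place break-loop distribution; objective: alternative.

-- ===== PORT A =====
-- res[i] += 1 ; exact: every index A reaches is in range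
def pvIncAt (res : List Int) (i : Int) : List Int :=
  PySem.List.pySetD res i (PySem.List.pyGetD res i 0 + 1)

-- A's `for i in r: res[i] += 1; rest -= 1; if rest == 0: break`
def pvLoopBreak : List Int → List Int → Int → (List Int × Int)
  | [], res, rest => (res, rest)
  | i :: is, res, rest =>
      let res' := pvIncAt res i
      let rest' := rest - 1
      if rest' = 0 then (res', 0) else pvLoopBreak is res' rest'

def divideAndRedistribute (a : Int) (b : Int) (alternate : Bool) : List Int :=
  let num := PySem.Int.floordiv a b
  let rest := PySem.Int.mod a b
  let res := List.replicate b.toNat num      -- [num] * _b (empty for _b ≤ 0)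
  if alternate then
    let p1 := if rest ≠ 0 then pvLoopBreak (PySem.List.pyRange 0 b 2) res rest else (res, rest)
    if p1.2 ≠ 0 then (pvLoopBreak (PySem.List.pyRange 1 b 2) p1.1 p1.2).1 else p1.1
  else
    (PySem.List.pyRange 0 rest 1).foldl pvIncAt res

-- ===== PORT B =====
def divideAndRedistribute_alt (a : Int) (b : Int) (alternate : Bool) : List Int :=
  let num := PySem.Int.floordiv a b
  let rest := PySem.Int.mod a b
  if alternate then
    let half := PySem.Int.floordiv (b + 1) 2
    (PySem.List.pyRange 0 b 1).map (fun i =>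
      num + (if (if PySem.Int.mod i 2 = 0 then PySem.Int.floordiv i 2
                 else half + PySem.Int.floordiv i 2) < rest then 1 else 0))
  else
    (PySem.List.pyRange 0 b 1).map (fun i => num + (if i < rest then 1 else 0))

-- ===== PRECONDITION & SPEC =====
-- Pre_ excludes only b = 0, where the Python A (and B) raise ZeroDivisionError.
def Pre_divideAndRedistribute (a : Int) (b : Int) (alternate : Bool) : Prop := b ≠ 0
instance (a : Int) (b : Int) (alternate : Bool) : Decidable (Pre_divideAndRedistribute a b alternate) := by unfold Pre_divideAndRedistribute; infer_instance
def pvWitness_divideAndRedistribute : Int × Int × Bool := (7, 3, true)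

def Spec_divideAndRedistribute (a : Int) (b : Int) (alternate : Bool) (out : List Int) : Prop := out = divideAndRedistribute_alt a b alternate
instance (a : Int) (b : Int) (alternate : Bool) (out : List Int) : Decidable (Spec_divideAndRedistribute a b alternate out) := by unfold Spec_divideAndRedistribute; infer_instance

-- ===== CLAIM (what is proved, stated in full; the proofs are below) =====
def Claim_equal_divideAndRedistribute : Prop := ∀ (a : Int) (b : Int) (alternate : Bool), Dom_divideAndRedistribute a b alternate → Pre_divideAndRedistribute a b alternate → Spec_divideAndRedistribute a b alternate (divideAndRedistribute a b alternate)

-- ===== LEMMAS AND PROOFS =====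

theorem pvIncAt_nil (i : Int) : pvIncAt [] i = [] := by
  unfold pvIncAt PySem.List.pySetD PySem.List.pySet?
  cases PySem.List.pyIdx? (List.length ([] : List Int)) i <;> rfl

theorem foldl_pvIncAt_nil (l : List Int) : l.foldl pvIncAt [] = [] := by
  induction l with
  | nil => rfl
  | cons i is ih => simp [List.foldl, pvIncAt_nil, ih]

theorem pvLoopBreak_nil_res (l : List Int) (r : Int) : (pvLoopBreak l [] r).1 = [] := by
  induction l generalizing r with
  | nil => rfl
  | cons i is ih =>
      simp only [pvLoopBreak, pvIncAt_nil]
      split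
      · rfl
      · exact ih _

theorem pvLoopBreak_eq (l : List Int) (res : List Int) (r : Int) (hr : 1 ≤ r) :
    pvLoopBreak l res r
      = ((l.take r.toNat).foldl pvIncAt res, r - (min r.toNat l.length : Nat)) := by
  induction l generalizing res r with
  | nil => simp [pvLoopBreak]
  | cons i is ih =>
      by_cases h1 : r = 1
      · subst h1
        have h : (1 : Int).toNat = 1 := rfl
        simp [pvLoopBreak, h, List.take_succ_cons, List.foldl]
      · have hr2 : 1 ≤ r - 1 := by omega
        have hne : r - 1 ≠ 0 := by omega
        rw [show pvLoopBreak (i :: is) res r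
              = pvLoopBreak is (pvIncAt res i) (r - 1) by
            simp [pvLoopBreak, hne]]
        rw [ih _ _ hr2]
        have htake : (i :: is).take r.toNat = i :: is.take (r - 1).toNat := by
          have h : r.toNat = (r - 1).toNat + 1 := by omega
          rw [h, List.take_succ_cons]
        rw [htake]
        refine Prod.ext rfl ?_
        simp only [List.length_cons]
        omega

-- A's break structure over two ranges equals one fold over the appended order list, truncated
theorem pvCombine (E O : List Int) (res : List Int) (r : Int) (hr : 1 ≤ r) :
    (if (pvLoopBreak E res r).2 ≠ 0
      then (pvLoopBreak O (pvLoopBreak E res r).1 (pvLoopBreak E res r).2).1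
      else (pvLoopBreak E res r).1)
    = ((E ++ O).take r.toNat).foldl pvIncAt res := by
  rw [pvLoopBreak_eq E res r hr]
  rw [List.take_append, List.foldl_append]
  by_cases h : r - (min r.toNat E.length : Nat) = 0
  · rw [if_neg (by simpa using h)]
    have h0 : r.toNat - E.length = 0 := by omega
    simp [h0]
  · rw [if_pos (by simpa using h)]
    have hr2 : 1 ≤ r - (min r.toNat E.length : Nat) := by omega
    rw [pvLoopBreak_eq O _ _ hr2]
    have ht : (r - (min r.toNat E.length : Nat)).toNat = r.toNat - E.length := by omega
    rw [ht]

theorem length_foldl_pvIncAt (l : List Int) (res : List Int) :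
    (l.foldl pvIncAt res).length = res.length := by
  induction l generalizing res with
  | nil => rfl
  | cons i is ih =>
      simp only [List.foldl]
      rw [ih]
      exact PySem.List.length_pySetD res i _

-- each increment hits a valid index, so the fold adds exactly the multiplicity of j
theorem getD_foldl_pvIncAt (l : List Int) (res : List Int)
    (hl : ∀ i ∈ l, ∃ k : Nat, i = (k : Int) ∧ k < res.length) (j : Nat) :
    PySem.List.pyGetD (l.foldl pvIncAt res) (j : Int) 0
      = PySem.List.pyGetD res (j : Int) 0 + l.count (j : Int) := by
  induction l generalizing res with
  | nil => simp
  | cons i is ih =>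
      obtain ⟨k, rfl, hk⟩ := hl _ List.mem_cons_self
      have hl' : ∀ x ∈ is, ∃ m : Nat, x = (m : Int) ∧ m < (pvIncAt res (k : Int)).length := by
        intro x hx
        obtain ⟨m, rfl, hm⟩ := hl x (List.mem_cons_of_mem _ hx)
        exact ⟨m, rfl, by unfold pvIncAt; rw [PySem.List.length_pySetD]; exact hm⟩
      rw [List.foldl_cons, ih _ hl']
      show PySem.List.pyGetD (PySem.List.pySetD res _ _) _ 0 + _ = _
      rw [PySem.List.pyGetD_pySetD_natCast res k j _ 0 hk, List.count_cons]
      by_cases h : j = k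
      · subst h
        rw [if_pos rfl, if_pos (by simp)]
        push_cast
        ring
      · rw [if_neg h, if_neg (by simp; omega)]
        push_cast
        ring

theorem count_eq_ite_mem (l : List Int) (h : l.Nodup) (x : Int) :
    l.count x = if x ∈ l then 1 else 0 := by
  by_cases hm : x ∈ l
  · rw [if_pos hm]; exact List.count_eq_one_of_mem h hm
  · rw [if_neg hm]; exact List.count_eq_zero_of_not_mem hm

-- lists equal iff same length and same pyGetD at every natural index
theorem ext_pyGetD (xs ys : List Int) (hlen : xs.length = ys.length)
    (h : ∀ j : Nat, j < xs.length →
      PySem.List.pyGetD xs (j : Int) 0 = PySem.List.pyGetD ys (j : Int) 0) : xs = ys := by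
  apply List.ext_getElem hlen
  intro j h1 h2
  have hj := h j h1
  rwa [PySem.List.pyGetD_natCast, PySem.List.pyGetD_natCast,
    List.getD_eq_getElem _ _ h1, List.getD_eq_getElem _ _ h2] at hj

-- ===== VERDICT (by name: the statement is the Claim_ definition above) =====
theorem divideAndRedistribute_spec : Claim_equal_divideAndRedistribute := by
  intro a b alternate _ hb
  unfold Spec_divideAndRedistribute divideAndRedistribute divideAndRedistribute_alt
  simp only
  rcases lt_or_gt_of_ne hb with hneg | hpos
  · -- b < 0 : both sides are []
    have hb0 : b.toNat = 0 := by omega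
    have hrange : PySem.List.pyRange 0 b 1 = [] :=
      PySem.List.pyRange_one_eq_nil (by omega)
    rw [hb0, hrange]
    simp only [List.replicate, List.map_nil]
    cases alternate with
    | false => simp [foldl_pvIncAt_nil]
    | true =>
        by_cases hrz : PySem.Int.mod a b = 0
        · simp [hrz]
        · simp [hrz, pvLoopBreak_nil_res]
  · -- b > 0
    obtain ⟨n, rfl⟩ : ∃ n : Nat, b = (n : Int) := ⟨b.toNat, by omega⟩
    have hn : 0 < n := by exact_mod_cast hpos
    set r := PySem.Int.mod a (n : Int) with hrdef
    have hr0 : 0 ≤ r := PySem.Int.mod_nonneg a hpos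
    have hrb : r < (n : Int) := PySem.Int.mod_lt a hpos
    set num := PySem.Int.floordiv a (n : Int) with hnumdef
    have htn : ((n : Int)).toNat = n := by omega
    rw [htn]
    cases alternate with
    | false =>
        simp only [Bool.false_eq_true, if_false]
        apply ext_pyGetD
        · rw [length_foldl_pvIncAt, List.length_replicate, List.length_map,
            PySem.List.length_pyRange_one]
          omega
        · intro j hj
          rw [length_foldl_pvIncAt, List.length_replicate] at hj
          rw [getD_foldl_pvIncAt _ _ (by
            intro i hi
            rw [PySem.List.mem_pyRange_one] at hi
            exact ⟨i.toNat, by omega, by rw [List.length_replicate]; omega⟩) j]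
          rw [count_eq_ite_mem _ (PySem.List.nodup_pyRange_one 0 r) _]
          rw [PySem.List.pyGetD_map_pyRange _ n j _ hj]
          rw [PySem.List.pyGetD_natCast,
            List.getD_eq_getElem _ _ (by rw [List.length_replicate]; omega),
            List.getElem_replicate]
          simp only [PySem.List.mem_pyRange_one]
          by_cases hlt : ((j : Nat) : Int) < r
          · simp [hlt]
          · simp [hlt]
    | true =>
        simp only [if_true]
        set E := PySem.List.pyRange 0 (n : Int) 2 with hEdef
        set O := PySem.List.pyRange 1 (n : Int) 2 with hOdef
        set e := (n + 1) / 2 with hedef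
        set o := n / 2 with hodef
        have hEn : (if (0 : Int) < ((n : Nat) : Int)
            then ((((n : Nat) : Int) - 0 + 2 - 1) / 2).toNat else 0) = e := by
          rw [if_pos (by exact_mod_cast hn)]
          omega
        have hOn : (if (1 : Int) < ((n : Nat) : Int)
            then ((((n : Nat) : Int) - 1 + 2 - 1) / 2).toNat else 0) = o := by
          split_ifs with h
          · omega
          · omega
        have hE : E = (List.range e).map (fun k : Nat => 0 + 2 * (k : Int)) := by
          rw [hEdef, PySem.List.pyRange_of_pos 0 ((n : Nat) : Int) (by norm_num), hEn]
        have hO : O = (List.range o).map (fun k : Nat => 1 + 2 * (k : Int)) := by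
          rw [hOdef, PySem.List.pyRange_of_pos 1 ((n : Nat) : Int) (by norm_num), hOn]
        have heo : e + o = n := by omega
        have hhalf : PySem.Int.floordiv (((n : Nat) : Int) + 1) 2 = (e : Int) := by
          rw [PySem.Int.floordiv_eq_ediv_of_pos (by norm_num)]
          omega
        by_cases hr : r = 0
        · -- rest = 0: no increments on either side
          rw [hr]
          have h1 : (if (0 : Int) ≠ 0 then pvLoopBreak E (List.replicate n num) 0
              else (List.replicate n num, (0 : Int))) = (List.replicate n num, (0 : Int)) := by
            norm_num
          rw [h1, if_neg (by simp)]
          show List.replicate n num = _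
          have hconst : ∀ i ∈ PySem.List.pyRange 0 ((n : Nat) : Int) 1,
              (num + if (if PySem.Int.mod i 2 = 0 then PySem.Int.floordiv i 2
                else PySem.Int.floordiv (((n : Nat) : Int) + 1) 2 + PySem.Int.floordiv i 2) < 0
                then 1 else 0) = (fun _ : Int => num) i := by
            intro i hi
            rw [PySem.List.mem_pyRange_one] at hi
            have hfd : 0 ≤ PySem.Int.floordiv i 2 := by
              rw [PySem.Int.floordiv_eq_ediv_of_pos (by norm_num)]
              omega
            have he0 : (0 : Int) ≤ (e : Int) := by omega
            rw [hhalf]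
            by_cases hm : PySem.Int.mod i 2 = 0
            · rw [if_pos hm, if_neg (by omega), add_zero]
            · rw [if_neg hm, if_neg (by omega), add_zero]
          rw [List.map_congr_left hconst, List.map_const', PySem.List.length_pyRange_one]
          congr 1
        · -- rest ≥ 1: A is a fold of the first r increments of the order list E ++ O
          have hr1 : 1 ≤ r := by omega
          simp only [ne_eq, hr, not_false_eq_true, if_true]
          have hA := pvCombine E O (List.replicate n num) r hr1
          simp only [ne_eq] at hA
          rw [hA]
          set t := r.toNat with htdef
          have hlenE : E.length = e := by rw [hE]; simp
          have hEO : (E ++ O).take t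
              = (List.range (min t e)).map (fun k : Nat => 0 + 2 * (k : Int))
                ++ (List.range (min (t - e) o)).map (fun k : Nat => 1 + 2 * (k : Int)) := by
            rw [List.take_append, hlenE, hE, hO, ← List.map_take, ← List.map_take,
              List.take_range, List.take_range]
          have hnodup : ((E ++ O).take t).Nodup := by
            rw [hEO]
            refine List.Nodup.append ?_ ?_ ?_
            · exact List.nodup_range.map (fun x y hxy => by omega)
            · exact List.nodup_range.map (fun x y hxy => by omega)
            · intro x hx hy
              simp only [List.mem_map, List.mem_range] at hx hy
              obtain ⟨k1, hk1, he1⟩ := hx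
              obtain ⟨k2, hk2, he2⟩ := hy
              omega
          apply ext_pyGetD
          · rw [length_foldl_pvIncAt, List.length_replicate, List.length_map,
              PySem.List.length_pyRange_one]
            omega
          · intro j hj
            rw [length_foldl_pvIncAt, List.length_replicate] at hj
            rw [getD_foldl_pvIncAt _ _ (by
              intro i hi
              have hi' := List.mem_of_mem_take hi
              rw [List.mem_append] at hi'
              have hib : 0 ≤ i ∧ i < ((n : Nat) : Int) := by
                rcases hi' with h | h
                · rw [hEdef, PySem.List.mem_pyRange_iff_of_pos (by norm_num)] at h
                  omega
                · rw [hOdef, PySem.List.mem_pyRange_iff_of_pos (by norm_num)] at h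
                  omega
              exact ⟨i.toNat, by omega, by rw [List.length_replicate]; omega⟩) j]
            rw [count_eq_ite_mem _ hnodup _]
            rw [PySem.List.pyGetD_map_pyRange _ n j _ hj]
            rw [PySem.List.pyGetD_natCast,
              List.getD_eq_getElem _ _ (by rw [List.length_replicate]; omega),
              List.getElem_replicate]
            have hmem : (((j : Nat) : Int) ∈ (E ++ O).take t)
                ↔ (if j % 2 = 0 then (j / 2 < t ∧ j / 2 < e)
                   else (j / 2 < t - e ∧ j / 2 < o)) := by
              rw [hEO, List.mem_append]
              simp only [List.mem_map, List.mem_range, lt_min_iff]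
              by_cases hpar : j % 2 = 0
              · rw [if_pos hpar]
                constructor
                · rintro (⟨k, hk, hkj⟩ | ⟨k, hk, hkj⟩) <;> omega
                · rintro ⟨h1, h2⟩
                  exact Or.inl ⟨j / 2, ⟨h1, h2⟩, by omega⟩
              · rw [if_neg hpar]
                constructor
                · rintro (⟨k, hk, hkj⟩ | ⟨k, hk, hkj⟩) <;> omega
                · rintro ⟨h1, h2⟩
                  exact Or.inr ⟨j / 2, ⟨h1, h2⟩, by omega⟩
            have hmodj : PySem.Int.mod ((j : Nat) : Int) 2 = ((j : Nat) : Int) % 2 :=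
              PySem.Int.mod_eq_emod_of_pos (by norm_num)
            have hdivj : PySem.Int.floordiv ((j : Nat) : Int) 2 = ((j : Nat) : Int) / 2 :=
              PySem.Int.floordiv_eq_ediv_of_pos (by norm_num)
            have hcond : (((j : Nat) : Int) ∈ (E ++ O).take t)
                ↔ ((if PySem.Int.mod ((j : Nat) : Int) 2 = 0
                    then PySem.Int.floordiv ((j : Nat) : Int) 2
                    else PySem.Int.floordiv (((n : Nat) : Int) + 1) 2
                      + PySem.Int.floordiv ((j : Nat) : Int) 2) < r) := by
              rw [hmem, hmodj, hdivj, hhalf]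
              by_cases hpar : j % 2 = 0
              · rw [if_pos hpar, if_pos (show ((j : Nat) : Int) % 2 = 0 by omega)]
                constructor
                · rintro ⟨h1, h2⟩
                  omega
                · intro h
                  exact ⟨by omega, by omega⟩
              · rw [if_neg hpar, if_neg (show ¬ ((j : Nat) : Int) % 2 = 0 by omega)]
                constructor
                · rintro ⟨h1, h2⟩
                  omega
                · intro h
                  exact ⟨by omega, by omega⟩
            have hgoal : num + ((if ((j : Nat) : Int) ∈ (E ++ O).take t then 1 else 0 : Nat) : Int)
                = num + (if (if PySem.Int.mod ((j : Nat) : Int) 2 = 0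
                      then PySem.Int.floordiv ((j : Nat) : Int) 2
                      else PySem.Int.floordiv (((n : Nat) : Int) + 1) 2
                        + PySem.Int.floordiv ((j : Nat) : Int) 2) < r then 1 else 0) := by
              by_cases hm : ((j : Nat) : Int) ∈ (E ++ O).take t
              · rw [if_pos hm, if_pos (hcond.mp hm)]
                norm_num
              · rw [if_neg hm, if_neg (fun h => hm (hcond.mpr h))]
                norm_num
            exact hgoal
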